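-- pv_equiv track=rewrite | github.com/chase1971/code_synopsis_annotator | intent_inference.py | _insert_human_readable_intent
-- ===== SOURCE A (Python) =====
-- def _insert_human_readable_intent(header_text: str, human_intent: str) -> str:
--     """
--     Insert a '# INTENT: ...' line near the top (after SYNOPSIS_HASH if present).
--     """
--     lines = header_text.splitlines()
--     # Find an anchor (SYNOPSIS_HASH or Generated line)
--     insert_at = None
--     for i, ln in enumerate(lines[:40]):
--         if ln.strip().startswith("# SYNOPSIS_HASH:"):
--             insert_at = i + 1
--             break
--     if insert_at is None:
--         for i, ln in enumerate(lines[:40]):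
--             if ln.strip().startswith("# Generated:"):
--                 insert_at = i + 1
--                 break
--     if insert_at is None:
--         insert_at = min(3, len(lines))
--     lines.insert(insert_at, f"# INTENT: {human_intent}")
--     return "\n".join(lines)
-- ===== SOURCE B (Python) =====
-- def _insert_human_readable_intent(header_text: str, human_intent: str) -> str:
--     lines = header_text.splitlines()
--     # Rank every anchor line in the first 40 lines (0 = SYNOPSIS_HASH, 1 = Generated)
--     # and pick the lexicographically smallest (rank, index) candidate.
--     cands = [
--         (0 if ln.strip().startswith("# SYNOPSIS_HASH:") else 1, i)
--         for i, ln in enumerate(lines[:40])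
--         if ln.strip().startswith("# SYNOPSIS_HASH:") or ln.strip().startswith("# Generated:")
--     ]
--     k = (min(cands)[1] + 1) if cands else min(3, len(lines))
--     return "\n".join(lines[:k] + ["# INTENT: " + human_intent] + lines[k:])
-- ===== Notes on version B (the rewrite author's own statement) =====
-- stated objective: alternative
-- what changed: Instead of A's two sequential early-exit scans and an in-place insert, B builds a ranked candidate list ((0,i) for SYNOPSIS_HASH lines, (1,i) for Generated lines) from the first 40 lines, takes its lexicographic minimum as the anchor, and rebuilds the result from two slices around the insertion point.
import Mathlib
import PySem

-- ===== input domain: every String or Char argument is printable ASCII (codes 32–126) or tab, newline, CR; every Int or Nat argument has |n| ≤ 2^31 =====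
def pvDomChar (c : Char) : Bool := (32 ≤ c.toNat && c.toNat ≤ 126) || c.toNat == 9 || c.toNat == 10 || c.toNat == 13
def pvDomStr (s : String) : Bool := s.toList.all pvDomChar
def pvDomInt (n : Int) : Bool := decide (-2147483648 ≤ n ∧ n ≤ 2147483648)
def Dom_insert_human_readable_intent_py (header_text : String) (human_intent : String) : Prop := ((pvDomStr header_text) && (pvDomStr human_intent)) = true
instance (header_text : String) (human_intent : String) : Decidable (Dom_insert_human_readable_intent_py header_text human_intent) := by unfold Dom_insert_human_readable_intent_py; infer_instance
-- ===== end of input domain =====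

-- B replaces A's two early-exit scans and in-place insert by a ranked candidate list
-- (0 = hash, 1 = generated) whose lexicographic minimum is the anchor, and rebuilds the
-- result from two slices; objective: alternative (same cost).

-- ===== PORT A =====
-- A's 'for i, ln in enumerate(lines[:40]): if …: insert_at = i+1; break' loop
def pvFindA (lines : List String) (p : String) (i : Nat) : Option Nat :=
  match lines with
  | [] => none
  | ln :: rest =>
    if PySem.Str.startswith (PySem.Str.strip ln) p then some (i + 1)
    else pvFindA rest p (i + 1)

def insert_human_readable_intent_py (header_text : String) (human_intent : String) : String :=
  let lines := PySem.Str.splitlines header_text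
  let insert_at :=
    match pvFindA (PySem.List.slice lines none (some 40)) "# SYNOPSIS_HASH:" 0 with
    | some k => k
    | none =>
      match pvFindA (PySem.List.slice lines none (some 40)) "# Generated:" 0 with
      | some k => k
      | none => min 3 lines.length
  PySem.Str.join "\n" (PySem.List.insert lines (insert_at : Int) ("# INTENT: " ++ human_intent))

-- ===== PORT B =====
-- B's comprehension: ranked (rank, index) candidates from the first 40 lines
def pvCands (lines : List String) (i : Int) : List (Int × Int) :=
  (PySem.List.enumerate lines i).filterMap (fun p =>
    if PySem.Str.startswith (PySem.Str.strip p.2) "# SYNOPSIS_HASH:" then some ((0 : Int), p.1)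
    else if PySem.Str.startswith (PySem.Str.strip p.2) "# Generated:" then some ((1 : Int), p.1)
    else none)

def insert_human_readable_intent_py_alt (header_text : String) (human_intent : String) : String :=
  let lines := PySem.Str.splitlines header_text
  let cands := pvCands (PySem.List.slice lines none (some 40)) 0
  -- Python min() on int pairs is lexicographic: min2? with the two projections
  let k : Int :=
    match PySem.List.min2? cands Prod.fst Prod.snd with
    | some m => m.2 + 1
    | none => min 3 (lines.length : Int)
  PySem.Str.join "\n"
    (PySem.List.slice lines none (some k) ++ ["# INTENT: " ++ human_intent] ++
      PySem.List.slice lines (some k) none)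

-- ===== PRECONDITION & SPEC =====
def Spec_insert_human_readable_intent_py (header_text : String) (human_intent : String) (out : String) : Prop := out = insert_human_readable_intent_py_alt header_text human_intent
instance (header_text : String) (human_intent : String) (out : String) : Decidable (Spec_insert_human_readable_intent_py header_text human_intent out) := by unfold Spec_insert_human_readable_intent_py; infer_instance

-- ===== CLAIM =====
def Claim_equal_insert_human_readable_intent_py : Prop := ∀ (header_text : String) (human_intent : String), Dom_insert_human_readable_intent_py header_text human_intent → Spec_insert_human_readable_intent_py header_text human_intent (insert_human_readable_intent_py header_text human_intent)

-- ===== LEMMAS AND PROOFS =====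

-- index of the first line (counting from i) whose strip starts with p
def pvHit (lines : List String) (p : String) (i : Int) : Option Int :=
  match lines with
  | [] => none
  | ln :: rest =>
    if PySem.Str.startswith (PySem.Str.strip ln) p then some i else pvHit rest p (i + 1)

theorem pvHit_bounds (lines : List String) (p : String) (i : Int) (s : Int)
    (h : pvHit lines p i = some s) : i ≤ s ∧ s < i + lines.length := by
  induction lines generalizing i with
  | nil => simp [pvHit] at h
  | cons ln rest ih =>
    simp only [pvHit] at h
    split_ifs at h with hc
    · cases h; simp only [List.length_cons]; push_cast; omega
    · have := ih (i + 1) h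
      simp only [List.length_cons]
      push_cast
      omega

theorem pvFindA_eq_hit (lines : List String) (p : String) (n : Nat) :
    pvFindA lines p n = (pvHit lines p (n : Int)).map (fun s => s.toNat + 1) := by
  induction lines generalizing n with
  | nil => rfl
  | cons ln rest ih =>
    simp only [pvFindA, pvHit]
    split_ifs
    · simp
    · rw [ih (n + 1)]; push_cast; rfl

-- the fold step of min2? · Prod.fst Prod.snd
def pvF (acc : Option (Int × Int)) (x : Int × Int) : Option (Int × Int) :=
  match acc with
  | none => some x
  | some m =>
    if (decide (x.1 < m.1) || !decide (m.1 < x.1) && decide (x.2 < m.2)) = true then some x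
    else some m

theorem min2?_eq_foldl_pvF (xs : List (Int × Int)) :
    PySem.List.min2? xs Prod.fst Prod.snd = List.foldl pvF none xs := by
  unfold PySem.List.min2?
  congr 1
  funext acc x
  cases acc <;> rfl

theorem pvCands_cons (ln : String) (rest : List String) (i : Int) :
    pvCands (ln :: rest) i =
      (if PySem.Str.startswith (PySem.Str.strip ln) "# SYNOPSIS_HASH:" then [((0 : Int), i)]
       else if PySem.Str.startswith (PySem.Str.strip ln) "# Generated:" then [((1 : Int), i)]
       else []) ++ pvCands rest (i + 1) := by
  simp only [pvCands, PySem.List.enumerate_cons, List.filterMap_cons]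
  split_ifs <;> simp

-- once the accumulator holds a hash candidate (0, j) with j below every later index, it never changes
theorem scan_keep_syn (rest : List String) (i j : Int) (hj : j < i) :
    List.foldl pvF (some (0, j)) (pvCands rest i) = some (0, j) := by
  induction rest generalizing i with
  | nil => rfl
  | cons ln tl ih =>
    rw [pvCands_cons]
    split_ifs with hs hg
    · simp only [List.cons_append, List.nil_append, List.foldl_cons]
      rw [show pvF (some ((0 : Int), j)) (0, i) = some (0, j) by simp [pvF]; omega]
      exact ih (i + 1) (by omega)
    · simp only [List.cons_append, List.nil_append, List.foldl_cons]
      rw [show pvF (some ((0 : Int), j)) (1, i) = some (0, j) by simp [pvF]]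
      exact ih (i + 1) (by omega)
    · simp only [List.nil_append]
      exact ih (i + 1) (by omega)

-- a generated-candidate accumulator survives until the first later hash candidate
theorem scan_keep_gen (rest : List String) (i j : Int) (hj : j < i) :
    List.foldl pvF (some (1, j)) (pvCands rest i) =
      match pvHit rest "# SYNOPSIS_HASH:" i with
      | some s => some (0, s)
      | none => some (1, j) := by
  induction rest generalizing i with
  | nil => rfl
  | cons ln tl ih =>
    rw [pvCands_cons]
    split_ifs with hs hg
    · simp only [List.cons_append, List.nil_append, List.foldl_cons]
      rw [show pvF (some ((1 : Int), j)) (0, i) = some (0, i) by simp [pvF],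
        scan_keep_syn tl (i + 1) i (by omega)]
      simp only [pvHit, hs, reduceIte]
    · simp only [List.cons_append, List.nil_append, List.foldl_cons]
      rw [show pvF (some ((1 : Int), j)) (1, i) = some (1, j) by simp [pvF]; omega,
        ih (i + 1) (by omega)]
      simp only [pvHit, hs, Bool.false_eq_true, if_false]
    · simp only [List.nil_append]
      rw [ih (i + 1) (by omega)]
      simp only [pvHit, hs, Bool.false_eq_true, if_false]

theorem min2?_cands_eq (lines : List String) (i : Int) :
    PySem.List.min2? (pvCands lines i) Prod.fst Prod.snd =
      match pvHit lines "# SYNOPSIS_HASH:" i with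
      | some s => some (0, s)
      | none =>
        match pvHit lines "# Generated:" i with
        | some g => some (1, g)
        | none => none := by
  induction lines generalizing i with
  | nil => rfl
  | cons ln rest ih =>
    rw [min2?_eq_foldl_pvF, pvCands_cons]
    split_ifs with hs hg
    · simp only [List.cons_append, List.nil_append, List.foldl_cons]
      rw [show pvF none ((0 : Int), i) = some (0, i) from rfl,
        scan_keep_syn rest (i + 1) i (by omega)]
      simp only [pvHit, hs, reduceIte]
    · simp only [List.cons_append, List.nil_append, List.foldl_cons]
      rw [show pvF none ((1 : Int), i) = some (1, i) from rfl,
        scan_keep_gen rest (i + 1) i (by omega)]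
      simp only [pvHit, hs, hg, Bool.false_eq_true, if_false, if_true]
    · simp only [List.nil_append]
      rw [← min2?_eq_foldl_pvF, ih (i + 1)]
      simp only [pvHit, hs, hg, Bool.false_eq_true, if_false]

-- both programs produce take/drop at the same position
theorem insert_eq_slices (lines : List String) (v : String) (p : Nat) (hp : p ≤ lines.length) :
    PySem.List.insert lines ((p : Nat) : Int) v =
      PySem.List.slice lines none (some ((p : Nat) : Int)) ++ [v] ++
        PySem.List.slice lines (some ((p : Nat) : Int)) none := by
  rw [PySem.List.insert_natCast lines p v hp, PySem.List.slice_to_natCast,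
    PySem.List.slice_from_natCast]
  simp

-- ===== VERDICT =====
theorem insert_human_readable_intent_py_spec : Claim_equal_insert_human_readable_intent_py := by
  intro header_text human_intent _
  unfold Spec_insert_human_readable_intent_py insert_human_readable_intent_py insert_human_readable_intent_py_alt
  simp only [min2?_cands_eq, pvFindA_eq_hit]
  have hlen : (PySem.List.slice (PySem.Str.splitlines header_text) none (some 40)).length
      ≤ (PySem.Str.splitlines header_text).length := by
    rw [show ((40 : Int)) = ((40 : Nat) : Int) from rfl, PySem.List.slice_to_natCast]
    simp [List.length_take]
  cases h1 : pvHit (PySem.List.slice (PySem.Str.splitlines header_text) none (some 40)) "# SYNOPSIS_HASH:" 0 with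
  | some s =>
    have hb := pvHit_bounds _ _ _ _ h1
    simp only [Option.map_some]
    rw [show s + 1 = ((s.toNat + 1 : Nat) : Int) by omega,
      insert_eq_slices _ _ (s.toNat + 1) (by omega)]
  | none =>
    simp only [Option.map_none]
    cases h2 : pvHit (PySem.List.slice (PySem.Str.splitlines header_text) none (some 40)) "# Generated:" 0 with
    | some g =>
      have hb := pvHit_bounds _ _ _ _ h2
      simp only [Option.map_some]
      rw [show g + 1 = ((g.toNat + 1 : Nat) : Int) by omega,
        insert_eq_slices _ _ (g.toNat + 1) (by omega)]
    | none =>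
      simp only [Option.map_none]
      rw [show min (3 : Int) ((PySem.Str.splitlines header_text).length : Int)
          = ((min 3 (PySem.Str.splitlines header_text).length : Nat) : Int) by push_cast; omega,
        insert_eq_slices _ _ (min 3 (PySem.Str.splitlines header_text).length) (by omega)]
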